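-- pv_equiv track=rewrite | github.com/jupblb/aoc-2020 | day14/solve1.py | recalculate_masks
-- ===== SOURCE A (Python) =====
-- def default_masks():
--     return (2 ** 36 - 1, 0)
--
-- def recalculate_masks(mask):
--     and_mask, or_mask = default_masks()
--     for i, c in enumerate(mask[::-1]):
--         if c == '0':
--             and_mask -= 2 ** i
--         if c == '1':
--             or_mask += 2 ** i
--     return (and_mask, or_mask)
-- ===== SOURCE B (Python) =====
-- def recalculate_masks(mask):
--     # Closed-form parse: read each mask position class as a binary number
--     # instead of accumulating powers of two bit by bit.
--     if not mask:
--         return (2 ** 36 - 1, 0)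
--     zeros = int(''.join('1' if c == '0' else '0' for c in mask), 2)
--     ones = int(''.join(c if c == '1' else '0' for c in mask), 2)
--     return (2 ** 36 - 1 - zeros, ones)
-- ===== Notes on version B (the rewrite author's own statement) =====
-- stated objective: simpler
-- what changed: Replaces the per-bit loop over the reversed mask with a closed-form parse: the '0' positions and the '1' positions are each read as one binary integer via int(...,2), and the and-mask is 2**36-1 minus the zeros number.
import Mathlib
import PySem

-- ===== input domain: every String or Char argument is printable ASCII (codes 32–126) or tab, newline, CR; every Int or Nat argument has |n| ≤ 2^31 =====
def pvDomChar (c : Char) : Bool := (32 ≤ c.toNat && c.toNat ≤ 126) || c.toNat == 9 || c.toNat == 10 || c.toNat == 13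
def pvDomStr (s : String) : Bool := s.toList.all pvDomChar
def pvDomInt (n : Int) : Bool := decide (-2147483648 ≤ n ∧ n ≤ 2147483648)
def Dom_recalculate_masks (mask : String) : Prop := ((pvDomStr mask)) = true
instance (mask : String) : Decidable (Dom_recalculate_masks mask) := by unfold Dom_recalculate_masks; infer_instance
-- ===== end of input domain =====

-- B replaces A's per-bit accumulation over the reversed mask by a closed-form binary
-- parse of the '0'-positions and '1'-positions (objective: simpler).

-- ===== PORT A =====
-- mask[::-1] ported as mask.toList.reverse (PySem.List.slice?_none_none_neg_one);
-- enumerate indices are ≥ 0, so 2 ** i is 2 ^ i.toNat exactly.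
def recalculate_masks (mask : String) : Int × Int :=
  (PySem.List.enumerate mask.toList.reverse 0).foldl
    (fun (st : Int × Int) (p : Int × Char) =>
      let st := if p.2 = '0' then (st.1 - 2 ^ p.1.toNat, st.2) else st
      if p.2 = '1' then (st.1, st.2 + 2 ^ p.1.toNat) else st)
    ((2:Int) ^ 36 - 1, 0)

-- ===== PORT B =====
-- int(s, 2) hand-ported for strings made only of '0'/'1' (exact on that domain,
-- which is all B ever feeds it).
def pvParseBin (l : List Char) : Int :=
  l.foldl (fun a c => 2 * a + (if c = '1' then 1 else 0)) 0

def recalculate_masks_alt (mask : String) : Int × Int :=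
  if mask.toList = [] then ((2:Int) ^ 36 - 1, 0)
  else
    let zeros := pvParseBin (mask.toList.map (fun c => if c = '0' then '1' else '0'))
    let ones := pvParseBin (mask.toList.map (fun c => if c = '1' then c else '0'))
    ((2:Int) ^ 36 - 1 - zeros, ones)

-- ===== PRECONDITION & SPEC =====
def Spec_recalculate_masks (mask : String) (out : Int × Int) : Prop := out = recalculate_masks_alt mask
instance (mask : String) (out : Int × Int) : Decidable (Spec_recalculate_masks mask out) := by unfold Spec_recalculate_masks; infer_instance

-- ===== CLAIM (what is proved, stated in full; the proofs are below) =====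
def Claim_equal_recalculate_masks : Prop := ∀ (mask : String), Dom_recalculate_masks mask → Spec_recalculate_masks mask (recalculate_masks mask)

-- ===== LEMMAS AND PROOFS =====

theorem pvParseBin_shift (l : List Char) (a : Int) :
    l.foldl (fun a c => 2 * a + (if c = '1' then 1 else 0)) a
      = a * 2 ^ l.length + pvParseBin l := by
  induction l generalizing a with
  | nil => simp [pvParseBin]
  | cons c t ih =>
    simp only [List.foldl_cons, pvParseBin, List.length_cons]
    rw [ih, ih (2 * 0 + _)]
    ring

theorem pvParseBin_cons (c : Char) (t : List Char) :
    pvParseBin (c :: t) = (if c = '1' then 1 else 0) * 2 ^ t.length + pvParseBin t := by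
  have h : pvParseBin (c :: t)
      = t.foldl (fun a c => 2 * a + (if c = '1' then 1 else 0)) (if c = '1' then 1 else 0) := by
    simp [pvParseBin]
  rw [h, pvParseBin_shift]

theorem recalc_fold (l : List Char) (a b : Int) :
    (PySem.List.enumerate l.reverse 0).foldl
      (fun (st : Int × Int) (p : Int × Char) =>
        let st := if p.2 = '0' then (st.1 - 2 ^ p.1.toNat, st.2) else st
        if p.2 = '1' then (st.1, st.2 + 2 ^ p.1.toNat) else st)
      (a, b)
    = (a - pvParseBin (l.map (fun c => if c = '0' then '1' else '0')),
       b + pvParseBin (l.map (fun c => if c = '1' then c else '0'))) := by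
  induction l generalizing a b with
  | nil => simp [pvParseBin]
  | cons c t ih =>
    have hrev : (c :: t).reverse = t.reverse ++ [c] := by simp
    rw [hrev, PySem.List.enumerate_append, List.foldl_append, ih]
    simp only [List.map_cons, pvParseBin_cons, List.length_map, List.length_reverse,
      PySem.List.enumerate, List.foldl_cons, List.foldl_nil]
    by_cases h0 : c = '0'
    · simp [h0, Int.toNat_natCast]
      ring_nf
    · by_cases h1 : c = '1'
      · simp [h1, Int.toNat_natCast]
        ring_nf
      · simp [h0, h1]

-- ===== VERDICT (by name: the statement is the Claim_ definition above) =====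
theorem recalculate_masks_spec : Claim_equal_recalculate_masks := by
  intro mask _
  unfold Spec_recalculate_masks recalculate_masks recalculate_masks_alt
  rw [recalc_fold]
  by_cases h : mask.toList = []
  · simp [h, pvParseBin]
  · simp [h]
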